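-- pv_equiv track=rewrite | github.com/rajkumar2804/vb_0574 | eyantra_task/scripts/ur5_1_pick.py | saved_trajectory
-- ===== SOURCE A (Python) =====
-- def saved_trajectory(arg_pkg_dic):
--     """
--     Function return the list of sorted names of the saved trajectories
--     file in 'eyantra_task/config/saved_trajectories/'folder according
--     to priority of the packages on shelf
--     :param arg_pkg_dic: Dictionary of packages colour
--     :type arg_pkg_dic: dict
--     :return: List of Saved plans names
--     :rtype: list
--     """
--     saved_plan_home_to_pkg = { 'HP':[] , 'MP':[] , 'LP':[] }
--     saved_plan_pkg_to_home = { 'HP':[] , 'MP':[] , 'LP':[] }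
--
--     packages_name = sorted(arg_pkg_dic.keys())
--     package_dic = arg_pkg_dic
--
--     for name in packages_name:
--
--         file_name1 = 'home_to_' + name + '.yaml'
--         file_name2 =  name + '_to_home.yaml'
--
--         if package_dic[name] == 'red':
--             saved_plan_home_to_pkg['HP'].append(file_name1)
--             saved_plan_pkg_to_home['HP'].append(file_name2)
--
--         elif package_dic[name] == 'yellow':
--             saved_plan_home_to_pkg['MP'].append(file_name1)
--             saved_plan_pkg_to_home['MP'].append(file_name2)
--
--         elif package_dic[name] == 'green':
--             saved_plan_home_to_pkg['LP'].append(file_name1)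
--             saved_plan_pkg_to_home['LP'].append(file_name2)
--
--     saved_plans = [ saved_plan_home_to_pkg , saved_plan_pkg_to_home]
--
--     return saved_plans
-- ===== SOURCE B (Python) =====
-- def saved_trajectory(arg_pkg_dic):
--     """
--     Same result as A: for each priority bucket, build the file lists
--     directly by a filtered comprehension over the sorted package names,
--     instead of one bucketing pass with if/elif.
--     """
--     names = sorted(arg_pkg_dic)
--     pairs = [('HP', 'red'), ('MP', 'yellow'), ('LP', 'green')]
--     home = {p: ['home_to_' + n + '.yaml' for n in names if arg_pkg_dic[n] == c]
--             for p, c in pairs}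
--     pkg = {p: [n + '_to_home.yaml' for n in names if arg_pkg_dic[n] == c]
--            for p, c in pairs}
--     return [home, pkg]
-- ===== Notes on version B (the rewrite author's own statement) =====
-- stated objective: idiomatic
-- what changed: Replaces the single bucketing pass with if/elif appends into pre-seeded dicts by per-priority filtered comprehensions over the sorted keys, assembling each result dict directly from the three (priority, color) pairs.
import Mathlib
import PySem

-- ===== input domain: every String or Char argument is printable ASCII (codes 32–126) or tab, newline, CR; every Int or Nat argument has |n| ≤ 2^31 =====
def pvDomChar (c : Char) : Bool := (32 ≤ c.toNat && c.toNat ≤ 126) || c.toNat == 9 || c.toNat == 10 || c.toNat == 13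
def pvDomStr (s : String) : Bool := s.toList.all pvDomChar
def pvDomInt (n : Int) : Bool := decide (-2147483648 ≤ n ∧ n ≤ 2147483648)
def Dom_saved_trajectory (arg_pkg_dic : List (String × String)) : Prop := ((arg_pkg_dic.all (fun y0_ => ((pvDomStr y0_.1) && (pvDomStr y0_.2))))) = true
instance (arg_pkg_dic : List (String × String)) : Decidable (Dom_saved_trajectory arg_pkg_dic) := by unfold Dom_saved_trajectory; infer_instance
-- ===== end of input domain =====

-- B groups by iterating the three (priority, color) pairs with filtered comprehensions over the
-- sorted keys, instead of A's single if/elif bucketing pass; same return value, no side effects.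

-- ===== PORT A =====
-- 'package_dic[name]' is ported as getD with default "": 'name' is always a key of the dict,
-- so the default is never the value used.
def saved_trajectory (arg_pkg_dic : List (String × String)) : List (List (String × List String)) :=
  let package_dic := PySem.Dict.ofList arg_pkg_dic
  let init : PySem.Dict String (List String) := PySem.Dict.ofList [("HP", []), ("MP", []), ("LP", [])]
  let packages_name := PySem.List.sorted package_dic.keys (fun x => x) false
  let res := packages_name.foldl
    (fun (st : PySem.Dict String (List String) × PySem.Dict String (List String)) name =>
      let file_name1 := "home_to_" ++ name ++ ".yaml"
      let file_name2 := name ++ "_to_home.yaml"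
      if package_dic.getD name "" == "red" then
        (st.1.modify "HP" [] (· ++ [file_name1]), st.2.modify "HP" [] (· ++ [file_name2]))
      else if package_dic.getD name "" == "yellow" then
        (st.1.modify "MP" [] (· ++ [file_name1]), st.2.modify "MP" [] (· ++ [file_name2]))
      else if package_dic.getD name "" == "green" then
        (st.1.modify "LP" [] (· ++ [file_name1]), st.2.modify "LP" [] (· ++ [file_name2]))
      else st)
    (init, init)
  [res.1.items, res.2.items]

-- ===== PORT B =====
def saved_trajectory_alt (arg_pkg_dic : List (String × String)) : List (List (String × List String)) :=
  let d := PySem.Dict.ofList arg_pkg_dic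
  let names := PySem.List.sorted d.keys (fun x => x) false
  let pairs : List (String × String) := [("HP", "red"), ("MP", "yellow"), ("LP", "green")]
  let home := pairs.map (fun pc =>
    (pc.1, (names.filter (fun n => d.getD n "" == pc.2)).map (fun n => "home_to_" ++ n ++ ".yaml")))
  let pkg := pairs.map (fun pc =>
    (pc.1, (names.filter (fun n => d.getD n "" == pc.2)).map (fun n => n ++ "_to_home.yaml")))
  [home, pkg]

-- ===== PRECONDITION & SPEC =====
def Spec_saved_trajectory (arg_pkg_dic : List (String × String)) (out : List (List (String × List String))) : Prop := out = saved_trajectory_alt arg_pkg_dic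
instance (arg_pkg_dic : List (String × String)) (out : List (List (String × List String))) : Decidable (Spec_saved_trajectory arg_pkg_dic out) := by unfold Spec_saved_trajectory; infer_instance

-- ===== CLAIM (what is proved, stated in full; the proofs are below) =====
def Claim_equal_saved_trajectory : Prop := ∀ (arg_pkg_dic : List (String × String)), Dom_saved_trajectory arg_pkg_dic → Spec_saved_trajectory arg_pkg_dic (saved_trajectory arg_pkg_dic)

-- ===== LEMMAS AND PROOFS =====

-- A's loop body acting on one of the two accumulator dicts
def pvStep (dic : PySem.Dict String String) (f : String → String)
    (d : PySem.Dict String (List String)) (name : String) : PySem.Dict String (List String) :=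
  if dic.getD name "" == "red" then d.modify "HP" [] (· ++ [f name])
  else if dic.getD name "" == "yellow" then d.modify "MP" [] (· ++ [f name])
  else if dic.getD name "" == "green" then d.modify "LP" [] (· ++ [f name])
  else d

lemma pvFold_pair (dic : PySem.Dict String String) (f g : String → String) :
    ∀ (l : List String) (d1 d2 : PySem.Dict String (List String)),
      l.foldl
        (fun (st : PySem.Dict String (List String) × PySem.Dict String (List String)) name =>
          if dic.getD name "" == "red" then
            (st.1.modify "HP" [] (· ++ [f name]), st.2.modify "HP" [] (· ++ [g name]))
          else if dic.getD name "" == "yellow" then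
            (st.1.modify "MP" [] (· ++ [f name]), st.2.modify "MP" [] (· ++ [g name]))
          else if dic.getD name "" == "green" then
            (st.1.modify "LP" [] (· ++ [f name]), st.2.modify "LP" [] (· ++ [g name]))
          else st)
        (d1, d2)
      = (l.foldl (pvStep dic f) d1, l.foldl (pvStep dic g) d2) := by
  intro l
  induction l with
  | nil => intro d1 d2; rfl
  | cons n t ih =>
      intro d1 d2
      simp only [List.foldl_cons, pvStep]
      split_ifs <;> exact ih _ _

lemma pvStep_getD (dic : PySem.Dict String String) (f : String → String) (k col : String)
    (hk : (k = "HP" ∧ col = "red") ∨ (k = "MP" ∧ col = "yellow") ∨ (k = "LP" ∧ col = "green")) :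
    ∀ (l : List String) (d : PySem.Dict String (List String)),
      (l.foldl (pvStep dic f) d).getD k [] =
        d.getD k [] ++ (l.filter (fun n => dic.getD n "" == col)).map f := by
  intro l
  induction l with
  | nil => intro d; simp
  | cons n t ih =>
      intro d
      simp only [List.foldl_cons]
      rw [ih]
      rcases hk with ⟨hk, hc⟩ | ⟨hk, hc⟩ | ⟨hk, hc⟩ <;> subst hk <;> subst hc <;>
        by_cases h1 : dic.getD n "" = "red" <;>
        by_cases h2 : dic.getD n "" = "yellow" <;>
        by_cases h3 : dic.getD n "" = "green" <;>
        simp [pvStep, h1, h2, h3, PySem.Dict.getD_modify]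
lemma pvStep_keys (dic : PySem.Dict String String) (f : String → String) :
    ∀ (l : List String) (d : PySem.Dict String (List String)),
      "HP" ∈ d.keys → "MP" ∈ d.keys → "LP" ∈ d.keys →
      (l.foldl (pvStep dic f) d).keys = d.keys := by
  intro l
  induction l with
  | nil => intro d _ _ _; rfl
  | cons n t ih =>
      intro d h1 h2 h3
      simp only [List.foldl_cons, pvStep]
      split_ifs with hr hy hg
      · have hkeys : (d.modify "HP" [] (· ++ [f n])).keys = d.keys := by
          simp [PySem.Dict.keys_modify, PySem.Dict.keys_insert_of_contains, PySem.Dict.contains_iff_mem_keys, h1]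
        rw [ih _ (by rw [hkeys]; exact h1) (by rw [hkeys]; exact h2) (by rw [hkeys]; exact h3), hkeys]
      · have hkeys : (d.modify "MP" [] (· ++ [f n])).keys = d.keys := by
          simp [PySem.Dict.keys_modify, PySem.Dict.keys_insert_of_contains, PySem.Dict.contains_iff_mem_keys, h2]
        rw [ih _ (by rw [hkeys]; exact h1) (by rw [hkeys]; exact h2) (by rw [hkeys]; exact h3), hkeys]
      · have hkeys : (d.modify "LP" [] (· ++ [f n])).keys = d.keys := by
          simp [PySem.Dict.keys_modify, PySem.Dict.keys_insert_of_contains, PySem.Dict.contains_iff_mem_keys, h3]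
        rw [ih _ (by rw [hkeys]; exact h1) (by rw [hkeys]; exact h2) (by rw [hkeys]; exact h3), hkeys]
      · exact ih d h1 h2 h3

theorem pv_main (arg_pkg_dic : List (String × String)) :
    saved_trajectory arg_pkg_dic = saved_trajectory_alt arg_pkg_dic := by
  simp only [saved_trajectory, saved_trajectory_alt]
  rw [pvFold_pair]
  have hinit : (PySem.Dict.ofList [("HP", ([] : List String)), ("MP", []), ("LP", [])]).keys
      = ["HP", "MP", "LP"] := by decide
  have hmem : ∀ k, k ∈ (["HP", "MP", "LP"] : List String) →
      k ∈ (PySem.Dict.ofList [("HP", ([] : List String)), ("MP", []), ("LP", [])]).keys := by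
    rw [hinit]; intro k hk; exact hk
  have hHP := hmem "HP" (by decide); have hMP := hmem "MP" (by decide); have hLP := hmem "LP" (by decide)
  rw [PySem.Dict.items_eq_map_keys _ (by rw [pvStep_keys _ _ _ _ hHP hMP hLP, hinit]; decide) ([] : List String),
      PySem.Dict.items_eq_map_keys _ (by rw [pvStep_keys _ _ _ _ hHP hMP hLP, hinit]; decide) ([] : List String),
      pvStep_keys _ _ _ _ hHP hMP hLP, pvStep_keys _ _ _ _ hHP hMP hLP, hinit]
  simp only [List.map_cons, List.map_nil]
  rw [pvStep_getD _ _ "HP" "red" (by simp), pvStep_getD _ _ "MP" "yellow" (by simp),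
      pvStep_getD _ _ "LP" "green" (by simp), pvStep_getD _ _ "HP" "red" (by simp),
      pvStep_getD _ _ "MP" "yellow" (by simp), pvStep_getD _ _ "LP" "green" (by simp)]
  have g1 : (PySem.Dict.ofList [("HP", ([] : List String)), ("MP", []), ("LP", [])]).getD "HP" [] = [] := by decide
  have g2 : (PySem.Dict.ofList [("HP", ([] : List String)), ("MP", []), ("LP", [])]).getD "MP" [] = [] := by decide
  have g3 : (PySem.Dict.ofList [("HP", ([] : List String)), ("MP", []), ("LP", [])]).getD "LP" [] = [] := by decide
  rw [g1, g2, g3]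
  simp

-- ===== VERDICT (by name: the statement is the Claim_ definition above) =====
theorem saved_trajectory_spec : Claim_equal_saved_trajectory := by
  intro arg _
  exact pv_main arg
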